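-- pv_equiv track=rewrite | github.com/aardschok/pyblish-magenta | pyblish_magenta/plugins/workflow/collect_instances.py | get_upstream_hierarchy_fast
-- ===== SOURCE A (Python) =====
-- def get_upstream_hierarchy_fast(nodes):
--     """Passed in nodes must be long names!"""
--
--     matched = set()
--     parents = []
--
--     for node in nodes:
--         hierarchy = node.split("|")
--         num = len(hierarchy)
--         for x in range(1, num-1):
--             parent = "|".join(hierarchy[:num-x])
--             if parent in parents:
--                 break
--             else:
--                 parents.append(parent)
--                 matched.add(parent)
--
--     return parents
-- ===== SOURCE B (Python) =====
-- def get_upstream_hierarchy_fast(nodes):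
--     """Passed in nodes must be long names!"""
--
--     all_parents = []
--     for node in nodes:
--         hierarchy = node.split("|")
--         for k in range(len(hierarchy) - 1, 1, -1):
--             all_parents.append("|".join(hierarchy[:k]))
--
--     return list(dict.fromkeys(all_parents))
-- ===== Notes on version B (the rewrite author's own statement) =====
-- stated objective: simpler
-- what changed: Replaces the interleaved membership-check-with-early-break loop by a two-phase structure: first materialize every candidate ancestor prefix into one flat list, then deduplicate it preserving first occurrence with dict.fromkeys (also dropping the dead 'matched' set).
import Mathlib
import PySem

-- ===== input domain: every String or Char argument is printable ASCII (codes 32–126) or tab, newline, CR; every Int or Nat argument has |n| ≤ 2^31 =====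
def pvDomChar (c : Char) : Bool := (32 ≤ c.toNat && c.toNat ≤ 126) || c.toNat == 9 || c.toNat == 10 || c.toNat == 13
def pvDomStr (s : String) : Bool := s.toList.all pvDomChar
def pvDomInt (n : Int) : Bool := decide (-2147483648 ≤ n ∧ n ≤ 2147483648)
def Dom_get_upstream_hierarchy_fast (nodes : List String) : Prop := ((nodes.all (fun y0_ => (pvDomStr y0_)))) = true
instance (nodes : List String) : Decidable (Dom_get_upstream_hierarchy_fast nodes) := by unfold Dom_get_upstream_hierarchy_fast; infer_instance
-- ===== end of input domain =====

-- B replaces A's interleaved membership-check-with-early-break by a two-phase structure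
-- (materialize all candidate prefixes, then dedup preserving first occurrence); objective: simpler.

-- node.split("|"): Python str.split with a nonempty separator (PySem.Str.split? s "|" = some of this)
def pvSplit (s : String) : List String := (PySem.Chars.splitOn s.toList "|".toList).map String.ofList

-- "|".join(parts)
def pvJoin (parts : List String) : String := PySem.Str.join "|" parts

-- ===== PORT A =====
-- the inner 'for x in range(1, num-1)' loop of A, with its break
def goA (hier : List String) (num : Int) :
    List Int → PySem.Set String × List String → PySem.Set String × List String
  | [], st => st
  | x :: xs, (matched, parents) =>
      let parent := pvJoin (PySem.List.slice hier none (some (num - x)))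
      if parents.contains parent then (matched, parents)   -- break
      else goA hier num xs (PySem.Set.add matched parent, parents ++ [parent])

def get_upstream_hierarchy_fast (nodes : List String) : List String :=
  (nodes.foldl
    (fun st node =>
      let hierarchy := pvSplit node
      let num : Int := hierarchy.length
      goA hierarchy num (PySem.List.pyRange 1 (num - 1) 1) st)
    (PySem.Set.empty, [])).2

-- ===== PORT B =====
def get_upstream_hierarchy_fast_alt (nodes : List String) : List String :=
  PySem.List.dedup
    (nodes.foldl
      (fun all_parents node =>
        let hierarchy := pvSplit node
        all_parents ++
          (PySem.List.pyRange ((hierarchy.length : Int) - 1) 1 (-1)).map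
            (fun k => pvJoin (PySem.List.slice hierarchy none (some k))))
      [])

-- ===== PRECONDITION & SPEC =====
def Spec_get_upstream_hierarchy_fast (nodes : List String) (out : List String) : Prop := out = get_upstream_hierarchy_fast_alt nodes
instance (nodes : List String) (out : List String) : Decidable (Spec_get_upstream_hierarchy_fast nodes out) := by unfold Spec_get_upstream_hierarchy_fast; infer_instance

-- ===== CLAIM (what is proved, stated in full; the proofs are below) =====
def Claim_equal_get_upstream_hierarchy_fast : Prop := ∀ (nodes : List String), Dom_get_upstream_hierarchy_fast nodes → Spec_get_upstream_hierarchy_fast nodes (get_upstream_hierarchy_fast nodes)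

-- ===== LEMMAS AND PROOFS =====

-- ---- characterizing Chars.splitOn with a single-character separator ----
def consHd (x : List Char) : List (List Char) → List (List Char)
  | [] => [x]
  | y :: ys => (x ++ y) :: ys

def splitSimp (c : Char) : List Char → List (List Char)
  | [] => [[]]
  | a :: rest => if a = c then [] :: splitSimp c rest else consHd [a] (splitSimp c rest)

theorem consHd_ne_nil (x : List Char) (ls : List (List Char)) : consHd x ls ≠ [] := by
  cases ls <;> simp [consHd]

theorem splitSimp_ne_nil (c : Char) (s : List Char) : splitSimp c s ≠ [] := by
  induction s with
  | nil => simp [splitSimp]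
  | cons a rest ih =>
    simp only [splitSimp]
    split
    · simp
    · exact consHd_ne_nil _ _

theorem mem_consHd {p x : List Char} {ls : List (List Char)} (h : p ∈ consHd x ls) :
    (∃ y, (y ∈ ls ∨ y = []) ∧ p = x ++ y) ∨ p ∈ ls := by
  cases ls with
  | nil => simp [consHd] at h; exact Or.inl ⟨[], Or.inr rfl, by simp [h]⟩
  | cons y ys =>
    simp [consHd] at h
    rcases h with h | h
    · exact Or.inl ⟨y, Or.inl (by simp), h⟩
    · exact Or.inr (by simp [h])

theorem mem_splitSimp_not_mem {c : Char} {s p : List Char} (h : p ∈ splitSimp c s) : c ∉ p := by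
  induction s generalizing p with
  | nil => simp [splitSimp] at h; simp [h]
  | cons a rest ih =>
    simp only [splitSimp] at h
    by_cases hac : a = c
    · simp [hac] at h
      rcases h with h | h
      · simp [h]
      · exact ih h
    · simp [hac] at h
      rcases mem_consHd h with ⟨y, hy, hp⟩ | hp
      · subst hp
        intro hc
        simp at hc
        rcases hc with hc | hc
        · exact hac hc.symm
        · rcases hy with hy | hy
          · exact ih hy hc
          · simp [hy] at hc
      · exact ih hp

theorem consHd_nil_of_ne_nil {ls : List (List Char)} (h : ls ≠ []) : consHd [] ls = ls := by
  cases ls with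
  | nil => exact absurd rfl h
  | cons y ys => simp [consHd]

theorem consHd_consHd (x y : List Char) (ls : List (List Char)) :
    consHd x (consHd y ls) = consHd (x ++ y) ls := by
  cases ls <;> simp [consHd]

theorem go_spec (c : Char) : ∀ (l : List Char) (fuel : Nat), l.length < fuel →
    ∀ (cur : List Char) (acc : List (List Char)),
    PySem.Chars.splitOn.go [c] fuel l cur acc = acc.reverse ++ consHd cur.reverse (splitSimp c l) := by
  intro l
  induction l with
  | nil =>
    intro fuel hf cur acc
    match fuel with
    | fuel + 1 =>
      rw [PySem.Chars.splitOn.go.eq_def]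
      simp [splitSimp, consHd]
  | cons a rest ih =>
    intro fuel hf cur acc
    match fuel with
    | fuel + 1 =>
      rw [PySem.Chars.splitOn.go.eq_def]
      simp only []
      by_cases hac : c = a
      · have hpre : [c].isPrefixOf (a :: rest) = true := by
          simp [List.isPrefixOf, hac]
        simp only [hpre, if_pos]
        have := ih fuel (by simpa using Nat.lt_of_succ_lt_succ hf) [] (cur.reverse :: acc)
        simp only [List.length_cons] at this ⊢
        simp only [List.length_nil, Nat.zero_add, List.drop_one, List.tail_cons]
        rw [this]
        simp only [List.reverse_nil]
        rw [consHd_nil_of_ne_nil (splitSimp_ne_nil c rest)]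
        simp [splitSimp, hac.symm, consHd]
      · have hpre : [c].isPrefixOf (a :: rest) = false := by
          simp [List.isPrefixOf]
          intro h; exact absurd h hac
        simp only [hpre]
        simp only [Bool.false_eq_true, if_false]
        rw [ih fuel (by simpa using Nat.lt_of_succ_lt_succ hf) (a :: cur) acc]
        have : splitSimp c (a :: rest) = consHd [a] (splitSimp c rest) := by
          simp [splitSimp]
          intro h; exact absurd h.symm hac
        rw [this, consHd_consHd]
        simp

theorem splitOn_eq_splitSimp (s : List Char) (c : Char) :
    PySem.Chars.splitOn s [c] = splitSimp c s := by
  show PySem.Chars.splitOn.go [c] (s.length + 1) s [] [] = _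
  rw [go_spec c s (s.length + 1) (Nat.lt_succ_self _) [] []]
  simp [consHd_nil_of_ne_nil (splitSimp_ne_nil c s)]

-- ---- bar-free lists of strings; injectivity of pvJoin ----
def BF (m : List String) : Prop := ∀ s ∈ m, ('|' : Char) ∉ s.toList

theorem pvSplit_BF (node : String) : BF (pvSplit node) := by
  intro s hs
  unfold pvSplit at hs
  rw [show "|".toList = ['|'] from rfl, splitOn_eq_splitSimp] at hs
  rcases List.mem_map.mp hs with ⟨p, hp, rfl⟩
  simpa using mem_splitSimp_not_mem hp

theorem pvJoin_toList (m : List String) :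
    (pvJoin m).toList = ['|'].intercalate (m.map String.toList) := by
  unfold pvJoin PySem.Str.join PySem.Chars.join
  simp

theorem pvJoin_inj {m m' : List String} (h1 : BF m) (h2 : BF m') (n1 : m ≠ []) (n2 : m' ≠ [])
    (h : pvJoin m = pvJoin m') : m = m' := by
  have ht : ('|' : Char) ∉ ([] : List Char) := by simp
  have h' : ['|'].intercalate (m.map String.toList) = ['|'].intercalate (m'.map String.toList) := by
    rw [← pvJoin_toList, ← pvJoin_toList, h]
  have e1 : List.splitOn '|' (['|'].intercalate (m.map String.toList)) = m.map String.toList :=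
    List.splitOn_intercalate _ _ (by
      intro l hl
      rcases List.mem_map.mp hl with ⟨s, hs, rfl⟩
      exact h1 s hs) (by simpa using n1)
  have e2 : List.splitOn '|' (['|'].intercalate (m'.map String.toList)) = m'.map String.toList :=
    List.splitOn_intercalate _ _ (by
      intro l hl
      rcases List.mem_map.mp hl with ⟨s, hs, rfl⟩
      exact h2 s hs) (by simpa using n2)
  have : m.map String.toList = m'.map String.toList := by rw [← e1, ← e2, h']
  have inj : Function.Injective String.toList := by
    intro a b hab
    have : String.ofList a.toList = String.ofList b.toList := by rw [hab]
    simpa using this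
  exact List.map_injective_iff.mpr inj this

-- ---- the candidate chain of a hierarchy ----
def chainL (l : List String) : List (List String) :=
  (List.range (l.length - 2)).map (fun k => l.take (l.length - 1 - k))

def chain (l : List String) : List String := (chainL l).map pvJoin

theorem chain_eq_nil {l : List String} (h : l.length ≤ 2) : chain l = [] := by
  unfold chain chainL
  simp [Nat.sub_eq_zero_of_le h]

theorem chainL_cons {l : List String} (h : 2 < l.length) :
    chainL l = l.dropLast :: chainL l.dropLast := by
  unfold chainL
  have hn : l.length - 2 = (l.length - 3) + 1 := by omega
  rw [hn, List.range_succ_eq_map, List.map_cons, List.map_map,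
      List.length_dropLast, show l.length - 1 - 2 = l.length - 3 by omega]
  congr 1
  · rw [show l.length - 1 - 0 = l.length - 1 by omega, ← List.dropLast_eq_take]
  · apply List.map_congr_left
    intro k hk
    rw [List.mem_range] at hk
    simp only [Function.comp]
    rw [List.dropLast_eq_take, List.take_take]
    congr 1
    omega

theorem chain_cons {l : List String} (h : 2 < l.length) :
    chain l = pvJoin l.dropLast :: chain l.dropLast := by
  unfold chain
  rw [chainL_cons h]
  simp

-- ---- reduction of both ports' inner loops to 'chain' ----
theorem range_take_eq (l : List String) (f : List String → String) :
    (List.range (l.length - 2)).map (fun k => f (l.take (l.length - 1 - k)))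
      = (chainL l).map f := by
  unfold chainL
  rw [List.map_map]
  simp [Function.comp]

theorem A_inner (l : List String) :
    (PySem.List.pyRange 1 ((l.length : Int) - 1) 1).map
      (fun x => pvJoin (PySem.List.slice l none (some ((l.length : Int) - x)))) = chain l := by
  rw [PySem.List.pyRange_one]
  have hlen : (((l.length : Int) - 1) - 1).toNat = l.length - 2 := by omega
  rw [hlen, List.map_map]
  rw [show chain l = (chainL l).map pvJoin from rfl, ← range_take_eq]
  apply List.map_congr_left
  intro k hk
  rw [List.mem_range] at hk
  simp only [Function.comp]
  have he : (l.length : Int) - (1 + (k : Int)) = ((l.length - 1 - k : Nat) : Int) := by omega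
  rw [he, PySem.List.slice_to_natCast]

theorem B_inner (l : List String) :
    (PySem.List.pyRange ((l.length : Int) - 1) 1 (-1)).map
      (fun k => pvJoin (PySem.List.slice l none (some k))) = chain l := by
  rw [PySem.List.pyRange_neg_one]
  have hlen : (((l.length : Int) - 1) - 1).toNat = l.length - 2 := by omega
  rw [hlen, List.map_map]
  rw [show chain l = (chainL l).map pvJoin from rfl, ← range_take_eq]
  apply List.map_congr_left
  intro k hk
  rw [List.mem_range] at hk
  simp only [Function.comp]
  have he : (l.length : Int) - 1 - (k : Int) = ((l.length - 1 - k : Nat) : Int) := by omega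
  rw [he, PySem.List.slice_to_natCast]

-- the break-scan over a list of already-joined candidates
def scanB : List String → List String → List String
  | [], ps => ps
  | c :: cs, ps => if ps.contains c then ps else scanB cs (ps ++ [c])

theorem goA_snd (hier : List String) (num : Int) :
    ∀ (xs : List Int) (m : PySem.Set String) (ps : List String),
    (goA hier num xs (m, ps)).2
      = scanB (xs.map (fun x => pvJoin (PySem.List.slice hier none (some (num - x))))) ps := by
  intro xs
  induction xs with
  | nil => intro m ps; rfl
  | cons x xs ih =>
    intro m ps
    simp only [goA, List.map_cons, scanB]
    split
    · rfl
    · exact ih _ _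

-- ---- Set.add facts ----
theorem Set_add_eq (ps : List String) (x : String) :
    PySem.Set.add ps x = if x ∈ ps then ps else ps ++ [x] := by
  show (if ps.contains x then ps else ps ++ [x]) = _
  by_cases h : x ∈ ps
  · simp [h]
  · simp [h]

theorem foldl_add_of_all_mem {xs ps : List String} (h : ∀ x ∈ xs, x ∈ ps) :
    xs.foldl PySem.Set.add ps = ps := by
  induction xs with
  | nil => rfl
  | cons x xs ih =>
    simp only [List.foldl_cons]
    rw [Set_add_eq, if_pos (h x (by simp))]
    exact ih (fun y hy => h y (by simp [hy]))

-- ---- the invariant and the core break-elimination lemma ----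
def Good (ps : List String) : Prop :=
  ∀ a ∈ ps, ∃ m, BF m ∧ 2 ≤ m.length ∧ a = pvJoin m ∧ ∀ b ∈ chain m, b ∈ ps

def GoodUpto (ps : List String) (m : List String) : Prop :=
  ∀ a ∈ ps, ∃ m', BF m' ∧ 2 ≤ m'.length ∧ a = pvJoin m' ∧
    ((∀ b ∈ chain m', b ∈ ps) ∨
     (m.length < m'.length ∧ ∀ b ∈ chain m', b ∈ ps ∨ b = pvJoin m ∨ b ∈ chain m))

theorem BF_sublist {l m : List String} (h : BF l) (hs : m ⊆ l) : BF m :=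
  fun s hsm => h s (hs hsm)

theorem core (n : Nat) : ∀ (m : List String), m.length = n → BF m → 2 ≤ m.length →
    ∀ ps, GoodUpto ps m →
    scanB (pvJoin m :: chain m) ps = (pvJoin m :: chain m).foldl PySem.Set.add ps
    ∧ Good ((pvJoin m :: chain m).foldl PySem.Set.add ps)
    ∧ (∀ a ∈ ps, a ∈ (pvJoin m :: chain m).foldl PySem.Set.add ps)
    ∧ (∀ b ∈ pvJoin m :: chain m, b ∈ (pvJoin m :: chain m).foldl PySem.Set.add ps) := by
  induction n using Nat.strongRecOn with
  | ind n ih =>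
  intro m hlen hBF h2 ps hG
  have hmne : m ≠ [] := by intro h; subst h; simp at h2
  by_cases hj : pvJoin m ∈ ps
  · -- break: pvJoin m already collected, and its whole chain is already there
    obtain ⟨m', hBF', h2', hjm', hcl⟩ := hG (pvJoin m) hj
    have hm'ne : m' ≠ [] := by intro h; subst h; simp at h2'
    have hmm : m' = m := pvJoin_inj hBF' hBF hm'ne hmne hjm'.symm
    subst hmm
    have hall : ∀ b ∈ chain m', b ∈ ps := by
      rcases hcl with h | ⟨hlt, _⟩
      · exact h
      · omega
    have hcontains : ps.contains (pvJoin m') = true := List.contains_iff_mem.mpr hj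
    have hfold : (pvJoin m' :: chain m').foldl PySem.Set.add ps = ps :=
      foldl_add_of_all_mem (by
        intro b hb
        rcases List.mem_cons.mp hb with rfl | hb
        · exact hj
        · exact hall b hb)
    refine ⟨?_, ?_, ?_, ?_⟩
    · simp only [scanB, hcontains, if_true, hfold]
    · rw [hfold]
      intro a ha
      obtain ⟨ma, hBFa, h2a, heqa, hcla⟩ := hG a ha
      refine ⟨ma, hBFa, h2a, heqa, ?_⟩
      rcases hcla with h | ⟨_, h⟩
      · exact h
      · intro b hb
        rcases h b hb with hb' | hb' | hb'
        · exact hb'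
        · exact hb' ▸ hj
        · exact hall b hb'
    · rw [hfold]; exact fun a ha => ha
    · rw [hfold]
      intro b hb
      rcases List.mem_cons.mp hb with rfl | hb
      · exact hj
      · exact hall b hb
  · -- pvJoin m is new: it is appended, then its chain is scanned
    have hcontains : ps.contains (pvJoin m) = false := by
      simp [hj]
    have hadd : PySem.Set.add ps (pvJoin m) = ps ++ [pvJoin m] := by
      rw [Set_add_eq, if_neg hj]
    by_cases hm3 : m.length ≤ 2
    · -- m has exactly two components: chain m = []
      have hch : chain m = [] := chain_eq_nil hm3
      refine ⟨?_, ?_, ?_, ?_⟩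
      · simp only [scanB, hcontains, Bool.false_eq_true, if_false, hch, List.foldl_cons,
          List.foldl_nil, scanB, hadd]
      · simp only [hch, List.foldl_cons, List.foldl_nil, hadd]
        intro a ha
        rcases List.mem_append.mp ha with ha | ha
        · obtain ⟨ma, hBFa, h2a, heqa, hcla⟩ := hG a ha
          refine ⟨ma, hBFa, h2a, heqa, ?_⟩
          rcases hcla with h | ⟨_, h⟩
          · exact fun b hb => List.mem_append_left _ (h b hb)
          · intro b hb
            rcases h b hb with hb' | hb' | hb'
            · exact List.mem_append_left _ hb'
            · exact hb' ▸ List.mem_append_right _ (by simp)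
            · rw [hch] at hb'; simp at hb'
        · simp at ha
          exact ⟨m, hBF, h2, ha, by rw [hch]; intro b hb; simp at hb⟩
      · simp only [hch, List.foldl_cons, List.foldl_nil, hadd]
        exact fun a ha => List.mem_append_left _ ha
      · simp only [hch, List.foldl_cons, List.foldl_nil, hadd]
        intro b hb
        rcases List.mem_cons.mp hb with rfl | hb
        · exact List.mem_append_right _ (by simp)
        · simp at hb
    · -- m has more than two components: chain m = pvJoin m.dropLast :: chain m.dropLast
      have hm3' : 2 < m.length := by omega
      have hd : m.dropLast.length = m.length - 1 := by simp
      have hch : chain m = pvJoin m.dropLast :: chain m.dropLast := chain_cons hm3'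
      have hGU : GoodUpto (ps ++ [pvJoin m]) m.dropLast := by
        intro a ha
        rcases List.mem_append.mp ha with ha | ha
        · obtain ⟨ma, hBFa, h2a, heqa, hcla⟩ := hG a ha
          refine ⟨ma, hBFa, h2a, heqa, ?_⟩
          rcases hcla with h | ⟨hlt, h⟩
          · exact Or.inl (fun b hb => List.mem_append_left _ (h b hb))
          · refine Or.inr ⟨by omega, ?_⟩
            intro b hb
            rcases h b hb with hb' | hb' | hb'
            · exact Or.inl (List.mem_append_left _ hb')
            · exact Or.inl (hb' ▸ List.mem_append_right _ (by simp))
            · rw [hch] at hb'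
              rcases List.mem_cons.mp hb' with rfl | hb'
              · exact Or.inr (Or.inl rfl)
              · exact Or.inr (Or.inr hb')
        · simp at ha
          refine ⟨m, hBF, h2, ha, Or.inr ⟨by omega, ?_⟩⟩
          intro b hb
          rw [hch] at hb
          rcases List.mem_cons.mp hb with rfl | hb
          · exact Or.inr (Or.inl rfl)
          · exact Or.inr (Or.inr hb)
      obtain ⟨e, g, mono, memall⟩ :=
        ih (m.length - 1) (by omega) m.dropLast (by omega)
          (BF_sublist hBF (List.dropLast_subset m)) (by omega) (ps ++ [pvJoin m]) hGU
      have hfold : (pvJoin m :: chain m).foldl PySem.Set.add ps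
          = (pvJoin m.dropLast :: chain m.dropLast).foldl PySem.Set.add (ps ++ [pvJoin m]) := by
        simp only [List.foldl_cons, hadd, hch]
      refine ⟨?_, ?_, ?_, ?_⟩
      · have step : scanB (pvJoin m :: chain m) ps
            = if ps.contains (pvJoin m) = true then ps else scanB (chain m) (ps ++ [pvJoin m]) := rfl
        rw [step, hcontains]
        simp only [Bool.false_eq_true, if_false]
        rw [hfold, hch]
        exact e
      · rw [hfold]; exact g
      · rw [hfold]
        exact fun a ha => mono a (List.mem_append_left _ ha)
      · rw [hfold]
        intro b hb
        rcases List.mem_cons.mp hb with rfl | hb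
        · exact mono _ (List.mem_append_right _ (by simp))
        · rw [hch] at hb
          exact memall b hb

-- ---- per-node and whole-list reductions ----
theorem node_step {l : List String} (hBF : BF l) {ps : List String} (h : Good ps) :
    scanB (chain l) ps = (chain l).foldl PySem.Set.add ps
    ∧ Good ((chain l).foldl PySem.Set.add ps) := by
  by_cases hl : l.length ≤ 2
  · rw [chain_eq_nil hl]; exact ⟨rfl, h⟩
  · rw [chain_cons (by omega)]
    have hd : l.dropLast.length = l.length - 1 := by simp
    have := core (l.length - 1) l.dropLast (by omega) (BF_sublist hBF (List.dropLast_subset l)) (by omega) ps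
      (fun a ha => (h a ha).imp (fun m' ⟨h1, h2, h3, h4⟩ => ⟨h1, h2, h3, Or.inl h4⟩))
    exact ⟨this.1, this.2.1⟩

theorem iter : ∀ (nodes : List String) (ps : List String), Good ps →
    nodes.foldl (fun ps node => scanB (chain (pvSplit node)) ps) ps
      = (nodes.map (fun node => chain (pvSplit node))).flatten.foldl PySem.Set.add ps
    ∧ Good ((nodes.map (fun node => chain (pvSplit node))).flatten.foldl PySem.Set.add ps) := by
  intro nodes
  induction nodes with
  | nil => intro ps h; exact ⟨rfl, h⟩
  | cons node nodes ih =>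
    intro ps h
    simp only [List.foldl_cons, List.map_cons, List.flatten_cons, List.foldl_append]
    obtain ⟨e1, g1⟩ := node_step (pvSplit_BF node) h
    rw [e1]
    exact ih _ g1

-- ---- assembling the two ports ----
theorem A_eq (nodes : List String) :
    get_upstream_hierarchy_fast nodes
      = nodes.foldl (fun ps node => scanB (chain (pvSplit node)) ps) [] := by
  unfold get_upstream_hierarchy_fast
  have key : ∀ (st : PySem.Set String × List String),
      (nodes.foldl (fun st node =>
        goA (pvSplit node) ((pvSplit node).length : Int)
          (PySem.List.pyRange 1 (((pvSplit node).length : Int) - 1) 1) st) st).2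
      = nodes.foldl (fun ps node => scanB (chain (pvSplit node)) ps) st.2 := by
    induction nodes with
    | nil => intro st; rfl
    | cons node nodes ih =>
      intro st
      simp only [List.foldl_cons]
      rw [ih]
      congr 1
      obtain ⟨m, ps⟩ := st
      rw [goA_snd, A_inner]
  exact key (PySem.Set.empty, [])

theorem B_eq (nodes : List String) :
    get_upstream_hierarchy_fast_alt nodes
      = (nodes.map (fun node => chain (pvSplit node))).flatten.foldl PySem.Set.add [] := by
  unfold get_upstream_hierarchy_fast_alt
  rw [PySem.List.dedup_eq_ofList, PySem.Set.ofList_eq_foldl]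
  congr 1
  induction nodes using List.reverseRecOn with
  | nil => rfl
  | append_singleton nodes node ih =>
    simp only [List.foldl_append, List.foldl_cons, List.foldl_nil, List.map_append,
      List.flatten_append, List.map_cons, List.map_nil, List.flatten_cons, List.flatten_nil,
      List.append_nil]
    rw [ih, B_inner]

-- ===== VERDICT (by name: the statement is the Claim_ definition above) =====
theorem get_upstream_hierarchy_fast_spec : Claim_equal_get_upstream_hierarchy_fast := by
  intro nodes _
  show get_upstream_hierarchy_fast nodes = get_upstream_hierarchy_fast_alt nodes
  rw [A_eq, B_eq]
  exact (iter nodes [] (by intro a ha; simp at ha)).1
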